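-- pv_equiv track=rewrite | github.com/himanbow/Self-Buildium-Integration | my_app/tasks/initiation.py | _normalize_gl_accounts
-- ===== SOURCE A (Python) =====
-- from typing import Any, Dict, Iterable, Mapping, MutableMapping, Optional, Protocol, Sequence
--
-- def _select_first_value(
--     data: Mapping[str, Any],
--     *,
--     candidates: Sequence[str],
-- ) -> Optional[Any]:
--     """Support tolerant lookups across the many Buildium field aliases."""
--     lowered = {key.lower() for key in candidates}
--     for key, value in data.items():
--         if str(key).lower() in lowered and value is not None:
--             return value
--     return None
--
-- def _normalize_gl_accounts(
--     accounts: Sequence[Mapping[str, Any]]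
-- ) -> Sequence[Mapping[str, str]]:
--     """Coerce Buildium GL payloads into stable id/name pairs for Firestore."""
--     normalized: list[Dict[str, str]] = []
--     for account in accounts:
--         if not isinstance(account, Mapping):
--             continue
--         normalized_account: Dict[str, str] = {}
--         identifier = _select_first_value(
--             account,
--             candidates=(
--                 "id",
--                 "glAccountId",
--                 "accountId",
--             ),
--         )
--         if identifier is not None:
--             normalized_account["id"] = str(identifier)
--
--         name = _select_first_value(
--             account,
--             candidates=(
--                 "name",
--                 "glAccountName",
--                 "accountName",
--                 "description",
--             ),
--         )
--         if name is not None: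
--             normalized_account["name"] = str(name)
--
--         if normalized_account:
--             if "id" not in normalized_account:
--                 # Firestore documents require stable key values, but
--                 # maintaining entries with a name-only payload still offers
--                 # value for operators during onboarding.
--                 normalized_account.setdefault("id", "")
--             normalized.append(normalized_account)
--     return normalized
-- ===== SOURCE B (Python) =====
-- from typing import Any, Dict, Mapping, Sequence
--
-- _ID_KEYS = {"id", "glaccountid", "accountid"}
-- _NAME_KEYS = {"name", "glaccountname", "accountname", "description"}
--
--
-- def _normalize_gl_accounts(
--     accounts: Sequence[Mapping[str, Any]]
-- ) -> Sequence[Mapping[str, str]]: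
--     """Coerce Buildium GL payloads into stable id/name pairs for Firestore."""
--     normalized: list = []
--     for account in accounts:
--         if not isinstance(account, Mapping):
--             continue
--         identifier = None
--         name = None
--         # single pass: record the first id-alias match and the first
--         # name-alias match (aliases are disjoint, checked per lowered key)
--         for key, value in account.items():
--             lowered = str(key).lower()
--             if identifier is None and lowered in _ID_KEYS and value is not None:
--                 identifier = value
--             if name is None and lowered in _NAME_KEYS and value is not None:
--                 name = value
--         entry: Dict[str, str] = {}
--         if identifier is not None:
--             entry["id"] = str(identifier)
--         if name is not None:
--             entry["name"] = str(name)
--         if entry: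
--             if "id" not in entry:
--                 entry["id"] = ""
--             normalized.append(entry)
--     return normalized
-- ===== Notes on version B (the rewrite author's own statement) =====
-- stated objective: alternative
-- what changed: Replaces the two per-account _select_first_value scans (one per field, each rebuilding a lowered candidate set) with precomputed lowered alias sets and a single pass over each account's items that records the first id-alias and first name-alias match.
import Mathlib
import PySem

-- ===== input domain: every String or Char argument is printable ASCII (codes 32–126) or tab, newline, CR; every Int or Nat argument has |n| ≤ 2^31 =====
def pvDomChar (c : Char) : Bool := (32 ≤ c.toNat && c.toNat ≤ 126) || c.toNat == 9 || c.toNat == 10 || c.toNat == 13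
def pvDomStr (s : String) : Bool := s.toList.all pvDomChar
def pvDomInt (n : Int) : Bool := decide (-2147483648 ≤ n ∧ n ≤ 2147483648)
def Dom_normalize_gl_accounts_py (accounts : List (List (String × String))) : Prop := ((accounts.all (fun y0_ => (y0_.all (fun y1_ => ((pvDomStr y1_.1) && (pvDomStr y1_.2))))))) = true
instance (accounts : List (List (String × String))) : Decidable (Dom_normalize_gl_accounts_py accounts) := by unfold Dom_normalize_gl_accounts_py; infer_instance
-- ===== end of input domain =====

-- ===== PORT A =====
-- B merges A's two `_select_first_value` scans per account into one pass; objective: alternative decomposition.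
-- String values are never `None`, so A's `value is not None` test is always true and is not ported.

-- `_select_first_value`'s scan loop (lowered candidate set precomputed by the caller wrapper below).
def pvSelGo (lowered : PySem.Set String) : List (String × String) → Option String
  | [] => none
  | (k, v) :: rest =>
    if lowered.contains (PySem.Str.lower k) then some v else pvSelGo lowered rest

def pvSelectFirstValue (data : List (String × String)) (candidates : List String) : Option String :=
  let lowered : PySem.Set String := PySem.Set.ofList (candidates.map PySem.Str.lower)
  pvSelGo lowered data

def pvStepA (normalized : List (List (String × String))) (account : List (String × String)) :
    List (List (String × String)) :=
  let na : PySem.Dict String String := PySem.Dict.empty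
  let na := match pvSelectFirstValue account ["id", "glAccountId", "accountId"] with
    | some identifier => na.insert "id" identifier
    | none => na
  let na := match pvSelectFirstValue account ["name", "glAccountName", "accountName", "description"] with
    | some name => na.insert "name" name
    | none => na
  if na.size ≠ 0 then
    let na := if na.contains "id" then na else na.setdefault "id" ""
    normalized ++ [na.items]
  else normalized

def normalize_gl_accounts_py (accounts : List (List (String × String))) : List (List (String × String)) :=
  accounts.foldl pvStepA []

-- ===== PORT B =====
def pvIdKeys : PySem.Set String := ["id", "glaccountid", "accountid"]
def pvNameKeys : PySem.Set String := ["name", "glaccountname", "accountname", "description"]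

-- B's single pass over one account's items.
def pvScan : List (String × String) → Option String × Option String → Option String × Option String
  | [], st => st
  | (k, v) :: rest, (i?, n?) =>
    let lowered := PySem.Str.lower k
    let i? := if i?.isNone && pvIdKeys.contains lowered then some v else i?
    let n? := if n?.isNone && pvNameKeys.contains lowered then some v else n?
    pvScan rest (i?, n?)

def pvStepB (acc : List (List (String × String))) (account : List (String × String)) :
    List (List (String × String)) :=
  match pvScan account (none, none) with
  | (some i, some n) => acc ++ [[("id", i), ("name", n)]]
  | (some i, none) => acc ++ [[("id", i)]]
  | (none, some n) => acc ++ [[("name", n), ("id", "")]]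
  | (none, none) => acc

def normalize_gl_accounts_py_alt (accounts : List (List (String × String))) : List (List (String × String)) :=
  accounts.foldl pvStepB []

-- ===== PRECONDITION & SPEC =====
def Spec_normalize_gl_accounts_py (accounts : List (List (String × String))) (out : List (List (String × String))) : Prop := out = normalize_gl_accounts_py_alt accounts
instance (accounts : List (List (String × String))) (out : List (List (String × String))) : Decidable (Spec_normalize_gl_accounts_py accounts out) := by unfold Spec_normalize_gl_accounts_py; infer_instance

-- ===== CLAIM (what is proved, stated in full; the proofs are below) =====
def Claim_equal_normalize_gl_accounts_py : Prop := ∀ (accounts : List (List (String × String))), Dom_normalize_gl_accounts_py accounts → Spec_normalize_gl_accounts_py accounts (normalize_gl_accounts_py accounts)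

-- ===== LEMMAS AND PROOFS =====
theorem pvIdSet_eq : PySem.Set.ofList ((["id", "glAccountId", "accountId"] : List String).map PySem.Str.lower) = pvIdKeys := by decide

theorem pvNameSet_eq : PySem.Set.ofList ((["name", "glAccountName", "accountName", "description"] : List String).map PySem.Str.lower) = pvNameKeys := by decide

theorem pvScan_eq (items : List (String × String)) :
    ∀ i? n?, pvScan items (i?, n?) = (i?.or (pvSelGo pvIdKeys items), n?.or (pvSelGo pvNameKeys items)) := by
  induction items with
  | nil => intro i? n?; simp [pvScan, pvSelGo]
  | cons kv rest ih =>
    intro i? n?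
    obtain ⟨k, v⟩ := kv
    simp only [pvScan, pvSelGo]
    rw [ih]
    cases i? <;> cases n? <;>
      cases hI : pvIdKeys.contains (PySem.Str.lower k) <;>
      cases hN : pvNameKeys.contains (PySem.Str.lower k) <;>
      simp

theorem pvStep_eq (acc : List (List (String × String))) (account : List (String × String)) :
    pvStepA acc account = pvStepB acc account := by
  unfold pvStepA pvStepB pvSelectFirstValue
  rw [pvIdSet_eq, pvNameSet_eq, pvScan_eq]
  cases hi : pvSelGo pvIdKeys account <;> cases hn : pvSelGo pvNameKeys account <;>
    simp [PySem.Dict.insert, PySem.Dict.empty, PySem.Dict.size, PySem.Dict.contains,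
      PySem.Dict.setdefault]

-- ===== VERDICT (by name: the statement is the Claim_ definition above) =====
theorem normalize_gl_accounts_py_spec : Claim_equal_normalize_gl_accounts_py := by
  intro accounts _
  unfold Spec_normalize_gl_accounts_py normalize_gl_accounts_py normalize_gl_accounts_py_alt
  have h : pvStepA = pvStepB := funext fun a => funext fun x => pvStep_eq a x
  rw [h]
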